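-- pv_equiv track=rewrite | github.com/DanielAlejandro2605/git-galaxy | services/api/src/modules/vectorizer.py | _parse_gitingest_output
-- ===== SOURCE A (Python) =====
-- from typing import Dict, List, Any, Tuple
--
-- def _parse_gitingest_output(repo_text: str) -> List[Dict[str, str]]:
--     """Parse gitingest output into files"""
--     files = []
--     current_file = None
--     current_content = []
--
--     for line in repo_text.split('\n'):
--         if line.startswith('## ') or line.startswith('File: '):
--             if current_file:
--                 files.append({
--                     'path': current_file,
--                     'content': '\n'.join(current_content)
--                 })
--             current_file = line.replace('## ', '').replace('File: ', '').strip()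
--             current_content = []
--         else:
--             current_content.append(line)
--
--     if current_file:
--         files.append({
--             'path': current_file,
--             'content': '\n'.join(current_content)
--         })
--
--     return files
-- ===== SOURCE B (Python) =====
-- def _parse_gitingest_output(repo_text: str):
--     """Parse gitingest output into files (index-first: find headers, slice sections)."""
--     lines = repo_text.split('\n')
--
--     def is_header(l):
--         return l.startswith('## ') or l.startswith('File: ')
--
--     n = len(lines)
--     i = 0
--     while i < n and not is_header(lines[i]):
--         i += 1  # skip preamble before the first header
--
--     files = []
--     while i < n:
--         path = lines[i].replace('## ', '').replace('File: ', '').strip()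
--         j = i + 1
--         while j < n and not is_header(lines[j]):
--             j += 1
--         if path:
--             files.append({'path': path, 'content': '\n'.join(lines[i + 1:j])})
--         i = j
--     return files
-- ===== Notes on version B (the rewrite author's own statement) =====
-- stated objective: alternative
-- what changed: Replaces A's stateful accumulate-and-flush loop over lines with an index-first pass: locate the header lines, then slice the lines strictly between consecutive headers as each section's content.
import Mathlib
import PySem

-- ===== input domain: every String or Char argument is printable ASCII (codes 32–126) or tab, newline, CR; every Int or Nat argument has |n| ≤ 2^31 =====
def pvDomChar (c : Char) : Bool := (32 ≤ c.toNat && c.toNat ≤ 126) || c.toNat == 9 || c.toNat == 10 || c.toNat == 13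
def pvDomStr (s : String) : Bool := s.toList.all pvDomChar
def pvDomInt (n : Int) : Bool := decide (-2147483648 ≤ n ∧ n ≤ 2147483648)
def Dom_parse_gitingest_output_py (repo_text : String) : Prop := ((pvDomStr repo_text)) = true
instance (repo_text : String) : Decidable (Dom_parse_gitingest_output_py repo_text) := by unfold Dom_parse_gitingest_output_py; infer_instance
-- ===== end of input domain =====

-- B replaces A's stateful accumulate-and-flush loop with an index-first pass (find header lines,
-- slice the lines between consecutive headers); alternative decomposition, same cost.

-- shared primitive wrappers (both Pythons test/compute these the same way)
def pvIsHeader (l : String) : Bool :=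
  PySem.Str.startswith l "## " || PySem.Str.startswith l "File: "

def pvPath (l : String) : String :=
  PySem.Str.strip (PySem.Str.replace (PySem.Str.replace l "## " "") "File: " "")

-- ===== PORT A =====
-- the appended dict and the truthiness test `if current_file:` (None or '' is falsy), as in A
def pvFlushA (cur : Option String) (content : List String) : List (List (String × String)) :=
  match cur with
  | none => []
  | some p => if p = "" then [] else [[("path", p), ("content", PySem.Str.join "\n" content)]]

def parse_gitingest_output_py (repo_text : String) : List (List (String × String)) :=
  let s := ((PySem.Chars.splitOn repo_text.toList ['\n']).map String.ofList).foldl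
    (fun (s : List (List (String × String)) × Option String × List String) line =>
      if pvIsHeader line then
        (s.1 ++ pvFlushA s.2.1 s.2.2, some (pvPath line), [])
      else
        (s.1, s.2.1, s.2.2 ++ [line]))
    ([], none, [])
  s.1 ++ pvFlushA s.2.1 s.2.2

-- ===== PORT B =====
-- Source B's inner while-loops over indices are the takeWhile/dropWhile scans below
def pvAltGo : List String → List (List (String × String))
  | [] => []
  | l :: rest =>
    let content := rest.takeWhile (fun x => !pvIsHeader x)
    let rest' := rest.dropWhile (fun x => !pvIsHeader x)
    let path := pvPath l
    (if path = "" then []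
     else [[("path", path), ("content", PySem.Str.join "\n" content)]]) ++ pvAltGo rest'
termination_by lines => lines.length
decreasing_by
  simpa using Nat.lt_succ_of_le (List.length_dropWhile_le _ _)

def parse_gitingest_output_py_alt (repo_text : String) : List (List (String × String)) :=
  let lines := (PySem.Chars.splitOn repo_text.toList ['\n']).map String.ofList
  pvAltGo (lines.dropWhile (fun x => !pvIsHeader x))

-- ===== PRECONDITION & SPEC =====
def Spec_parse_gitingest_output_py (repo_text : String) (out : List (List (String × String))) : Prop := out = parse_gitingest_output_py_alt repo_text
instance (repo_text : String) (out : List (List (String × String))) : Decidable (Spec_parse_gitingest_output_py repo_text out) := by unfold Spec_parse_gitingest_output_py; infer_instance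

-- ===== CLAIM (what is proved, stated in full; the proofs are below) =====
def Claim_equal_parse_gitingest_output_py : Prop := ∀ (repo_text : String), Dom_parse_gitingest_output_py repo_text → Spec_parse_gitingest_output_py repo_text (parse_gitingest_output_py repo_text)

-- ===== LEMMAS AND PROOFS =====
-- loop invariant of A's fold, expressed through B's section decomposition
theorem pv_loop (lines : List String) :
    ∀ (files : List (List (String × String))) (cur : Option String) (content : List String),
    (let s := lines.foldl
        (fun (s : List (List (String × String)) × Option String × List String) line =>
          if pvIsHeader line then
            (s.1 ++ pvFlushA s.2.1 s.2.2, some (pvPath line), [])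
          else
            (s.1, s.2.1, s.2.2 ++ [line]))
        (files, cur, content);
      s.1 ++ pvFlushA s.2.1 s.2.2)
    = files ++ pvFlushA cur (content ++ lines.takeWhile (fun x => !pvIsHeader x))
        ++ pvAltGo (lines.dropWhile (fun x => !pvIsHeader x)) := by
  induction lines with
  | nil => intro files cur content; simp [pvAltGo]
  | cons l rest ih =>
    intro files cur content
    by_cases h : pvIsHeader l = true
    · simp only [List.foldl_cons, h, List.takeWhile_cons, List.dropWhile_cons, Bool.not_true]
      rw [ih]
      simp [pvAltGo, pvFlushA, List.append_assoc]
    · simp only [List.foldl_cons, h, List.takeWhile_cons, List.dropWhile_cons, Bool.not_true]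
      rw [ih]
      simp [List.append_assoc]

-- ===== VERDICT (by name: the statement is the Claim_ definition above) =====
theorem parse_gitingest_output_py_spec : Claim_equal_parse_gitingest_output_py := by
  intro repo_text _
  unfold Spec_parse_gitingest_output_py parse_gitingest_output_py parse_gitingest_output_py_alt
  rw [pv_loop]
  simp [pvFlushA]
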